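-- pv_equiv track=rewrite | github.com/dbp109/Battleships | battleships.py | is_open_sea
-- ===== SOURCE A (Python) =====
-- def is_open_sea(row, column, fleet):
--     '''checks if the square given by row and column neither contains nor is adjacent
--     (horizontally, vertically, or diagonally) to some ship in fleet. Returns Boolean
--     True if so and False otherwise'''
--     for ship in fleet:
--         for i in range(ship[3]):
--             if ship[2]:
--                 old_row = ship[0]
--                 old_column = ship[1] + i
--             else:
--                 old_row = ship[0] + i
--                 old_column = ship[1]
--             if old_row == row and old_column == column:
--                 return False
--             if old_row == row-1 and old_column == column-1:
--                 return False
--             if old_row == row-1 and old_column == column: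
--                 return False
--             if old_row == row-1 and old_column == column+1:
--                 return False
--             if old_row == row and old_column == column-1:
--                 return False
--             if old_row == row and old_column == column+1:
--                 return False
--             if old_row == row+1 and old_column == column-1:
--                 return False
--             if old_row == row+1 and old_column == column:
--                 return False
--             if old_row == row+1 and old_column == column+1:
--                 return False
--     return True
-- ===== SOURCE B (Python) =====
-- def is_open_sea(row, column, fleet):
--     '''checks if the square given by row and column neither contains nor is adjacent
--     (horizontally, vertically, or diagonally) to some ship in fleet.'''
--     occupied = set()
--     for ship in fleet:
--         r, c, horizontal, length = ship[0], ship[1], ship[2], ship[3]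
--         for i in range(length):
--             if horizontal:
--                 occupied.add((r, c + i))
--             else:
--                 occupied.add((r + i, c))
--     for dr in (-1, 0, 1):
--         for dc in (-1, 0, 1):
--             if (row + dr, column + dc) in occupied:
--                 return False
--     return True
-- ===== Notes on version B (the rewrite author's own statement) =====
-- stated objective: alternative
-- what changed: Instead of comparing every ship cell against nine hard-coded neighbour equalities, B first builds a set of all occupied coordinates and then tests the fixed 3x3 neighbourhood of the query square for membership.
-- outside the precondition, e.g. on is_open_sea(0, 0, [(0, 0, 1, 1), (5,)]): A returns False, B raises IndexError
import Mathlib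
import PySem

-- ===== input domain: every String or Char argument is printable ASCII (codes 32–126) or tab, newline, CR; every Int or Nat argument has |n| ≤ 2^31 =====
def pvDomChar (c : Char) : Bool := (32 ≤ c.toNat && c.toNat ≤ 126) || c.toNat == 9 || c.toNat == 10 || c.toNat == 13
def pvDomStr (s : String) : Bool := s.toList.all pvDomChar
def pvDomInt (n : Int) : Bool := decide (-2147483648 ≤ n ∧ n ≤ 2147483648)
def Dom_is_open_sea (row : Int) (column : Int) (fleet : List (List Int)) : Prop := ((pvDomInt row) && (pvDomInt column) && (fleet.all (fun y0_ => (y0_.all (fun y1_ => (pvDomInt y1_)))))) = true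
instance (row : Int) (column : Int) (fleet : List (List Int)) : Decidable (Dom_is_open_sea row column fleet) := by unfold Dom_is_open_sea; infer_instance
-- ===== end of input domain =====

-- B replaces A's nine per-cell neighbour comparisons by a prebuilt set of occupied cells
-- probed at the nine 3x3 offsets of the query square (alternative decomposition, same cost).


-- ===== PORT A =====
-- the nine if-return-False tests of A, in A's order
def pvHitA (row column old_row old_column : Int) : Bool :=
  (old_row == row && old_column == column) ||
  (old_row == row - 1 && old_column == column - 1) ||
  (old_row == row - 1 && old_column == column) ||
  (old_row == row - 1 && old_column == column + 1) ||
  (old_row == row && old_column == column - 1) ||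
  (old_row == row && old_column == column + 1) ||
  (old_row == row + 1 && old_column == column - 1) ||
  (old_row == row + 1 && old_column == column) ||
  (old_row == row + 1 && old_column == column + 1)

-- inner loop 'for i in range(ship[3])'; pyGetD is exact under Pre_ (ship has ≥ 4 entries)
def pvShipLoopA (row column : Int) (ship : List Int) : List Int → Bool
  | [] => true
  | i :: rest =>
      let old_row := if PySem.List.pyGetD ship 2 0 ≠ 0 then PySem.List.pyGetD ship 0 0
                     else PySem.List.pyGetD ship 0 0 + i
      let old_column := if PySem.List.pyGetD ship 2 0 ≠ 0 then PySem.List.pyGetD ship 1 0 + i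
                        else PySem.List.pyGetD ship 1 0
      if pvHitA row column old_row old_column then false
      else pvShipLoopA row column ship rest

-- outer loop 'for ship in fleet'
def pvFleetLoopA (row column : Int) : List (List Int) → Bool
  | [] => true
  | ship :: rest =>
      if pvShipLoopA row column ship
           (PySem.List.pyRange 0 (PySem.List.pyGetD ship 3 0) 1) then
        pvFleetLoopA row column rest
      else false

def is_open_sea (row : Int) (column : Int) (fleet : List (List Int)) : Bool :=
  pvFleetLoopA row column fleet

-- ===== PORT B =====
-- the cell ship occupies at step i (B destructures r, c, horizontal first)
def pvCellB (ship : List Int) (i : Int) : Int × Int :=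
  if PySem.List.pyGetD ship 2 0 ≠ 0 then
    (PySem.List.pyGetD ship 0 0, PySem.List.pyGetD ship 1 0 + i)
  else
    (PySem.List.pyGetD ship 0 0 + i, PySem.List.pyGetD ship 1 0)

-- occupied = set of all ship cells, built once
def pvOccupied (fleet : List (List Int)) : PySem.Set (Int × Int) :=
  fleet.foldl
    (fun s ship =>
      (PySem.List.pyRange 0 (PySem.List.pyGetD ship 3 0) 1).foldl
        (fun s i => PySem.Set.add s (pvCellB ship i)) s)
    PySem.Set.empty

def is_open_sea_alt (row : Int) (column : Int) (fleet : List (List Int)) : Bool :=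
  let occupied := pvOccupied fleet
  !(([-1, 0, 1] : List Int).any (fun dr =>
      ([-1, 0, 1] : List Int).any (fun dc =>
        PySem.Set.contains occupied (row + dr, column + dc))))

-- ===== PRECONDITION & SPEC =====
-- Pre_ excludes fleets containing a ship list with fewer than 4 entries: indexing ship[3]
-- (A) or ship[0..3] (B) raises IndexError there; A may still return False when an earlier
-- ship already decides the answer, but B raises, so such fleets are excluded entirely.
def Pre_is_open_sea (row : Int) (column : Int) (fleet : List (List Int)) : Prop :=
  ∀ ship ∈ fleet, 4 ≤ ship.length
instance (row : Int) (column : Int) (fleet : List (List Int)) : Decidable (Pre_is_open_sea row column fleet) := by unfold Pre_is_open_sea; infer_instance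

def pvWitness_is_open_sea : Int × Int × List (List Int) := (0, 0, [[2, 2, 1, 3]])

def Spec_is_open_sea (row : Int) (column : Int) (fleet : List (List Int)) (out : Bool) : Prop := out = is_open_sea_alt row column fleet
instance (row : Int) (column : Int) (fleet : List (List Int)) (out : Bool) : Decidable (Spec_is_open_sea row column fleet out) := by unfold Spec_is_open_sea; infer_instance

-- ===== CLAIM (what is proved, stated in full; the proofs are below) =====
def Claim_equal_is_open_sea : Prop := ∀ (row : Int) (column : Int) (fleet : List (List Int)), Dom_is_open_sea row column fleet → Pre_is_open_sea row column fleet → Spec_is_open_sea row column fleet (is_open_sea row column fleet)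

-- ===== LEMMAS AND PROOFS =====

-- A's nine equality tests are exactly "the cell lies in the 3x3 neighbourhood"
lemma pvHitA_iff (row column r c : Int) :
    pvHitA row column r c = true ↔
      (row - 1 ≤ r ∧ r ≤ row + 1 ∧ column - 1 ≤ c ∧ c ≤ column + 1) := by
  simp only [pvHitA, Bool.or_eq_true, Bool.and_eq_true, beq_iff_eq]
  omega

-- A's inner loop returns false iff some visited cell hits
lemma pvShipLoopA_eq (row column : Int) (ship : List Int) (idxs : List Int) :
    pvShipLoopA row column ship idxs
      = !(idxs.any (fun i => pvHitA row column (pvCellB ship i).1 (pvCellB ship i).2)) := by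
  induction idxs with
  | nil => rfl
  | cons i rest ih =>
      simp only [pvShipLoopA, pvCellB, List.any_cons]
      by_cases h : PySem.List.pyGetD ship 2 0 ≠ 0
      · rw [if_pos h, if_pos h, if_pos h]
        split <;> simp_all [pvCellB]
      · rw [if_neg h, if_neg h, if_neg h]
        split <;> simp_all [pvCellB]

-- A returns false iff some ship has a hitting cell
lemma pvFleetLoopA_eq (row column : Int) (fleet : List (List Int)) :
    pvFleetLoopA row column fleet
      = !(fleet.any (fun ship =>
            (PySem.List.pyRange 0 (PySem.List.pyGetD ship 3 0) 1).any
              (fun i => pvHitA row column (pvCellB ship i).1 (pvCellB ship i).2))) := by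
  induction fleet with
  | nil => rfl
  | cons ship rest ih =>
      simp only [pvFleetLoopA, List.any_cons, pvShipLoopA_eq]
      split <;> simp_all

-- membership in the occupied set = some ship covers the cell
lemma mem_pvOccupied (fleet : List (List Int)) (p : Int × Int) :
    p ∈ pvOccupied fleet ↔
      ∃ ship ∈ fleet, ∃ i ∈ PySem.List.pyRange 0 (PySem.List.pyGetD ship 3 0) 1,
        pvCellB ship i = p := by
  suffices h : ∀ (s : PySem.Set (Int × Int)),
      p ∈ fleet.foldl
        (fun s ship =>
          (PySem.List.pyRange 0 (PySem.List.pyGetD ship 3 0) 1).foldl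
            (fun s i => PySem.Set.add s (pvCellB ship i)) s) s
      ↔ p ∈ s ∨ ∃ ship ∈ fleet, ∃ i ∈ PySem.List.pyRange 0 (PySem.List.pyGetD ship 3 0) 1,
          pvCellB ship i = p by
    have := h PySem.Set.empty
    simpa [pvOccupied, PySem.Set.empty] using this
  have hinner : ∀ (ship : List Int) (idxs : List Int) (s : PySem.Set (Int × Int)),
      p ∈ idxs.foldl (fun s i => PySem.Set.add s (pvCellB ship i)) s
        ↔ p ∈ s ∨ ∃ i ∈ idxs, pvCellB ship i = p := by
    intro ship idxs
    induction idxs with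
    | nil => simp
    | cons i rest ih =>
        intro s
        simp only [List.foldl_cons, ih, PySem.Set.mem_add, List.mem_cons]
        constructor
        · rintro (⟨h | h⟩ | ⟨j, hj, hc⟩)
          · exact Or.inl h
          · exact Or.inr ⟨i, Or.inl rfl, h.symm⟩
          · exact Or.inr ⟨j, Or.inr hj, hc⟩
        · rintro (h | ⟨j, (rfl | hj), hc⟩)
          · exact Or.inl (Or.inl h)
          · exact Or.inl (Or.inr hc.symm)
          · exact Or.inr ⟨j, hj, hc⟩
  intro s
  induction fleet generalizing s with
  | nil => simp
  | cons ship rest ih =>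
      simp only [List.foldl_cons, ih, hinner, List.mem_cons]
      constructor
      · rintro (⟨h | h⟩ | ⟨sh, hsh, hi⟩)
        · exact Or.inl h
        · exact Or.inr ⟨ship, Or.inl rfl, h⟩
        · exact Or.inr ⟨sh, Or.inr hsh, hi⟩
      · rintro (h | ⟨sh, (rfl | hsh), hi⟩)
        · exact Or.inl (Or.inl h)
        · exact Or.inl (Or.inr hi)
        · exact Or.inr ⟨sh, hsh, hi⟩

-- B returns false iff an occupied cell lies in the 3x3 neighbourhood
lemma is_open_sea_alt_eq_false (row column : Int) (fleet : List (List Int)) :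
    is_open_sea_alt row column fleet = false ↔
      ∃ p ∈ pvOccupied fleet,
        row - 1 ≤ p.1 ∧ p.1 ≤ row + 1 ∧ column - 1 ≤ p.2 ∧ p.2 ≤ column + 1 := by
  simp only [is_open_sea_alt, Bool.not_eq_false', List.any_eq_true, PySem.Set.contains]
  constructor
  · rintro ⟨dr, hdr, dc, hdc, hmem⟩
    refine ⟨(row + dr, column + dc), by simpa using hmem, ?_⟩
    simp only [List.mem_cons] at hdr hdc
    rcases hdr with rfl | rfl | rfl | h <;> rcases hdc with rfl | rfl | rfl | h' <;>
      first | omega | simp_all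
  · rintro ⟨⟨pr, pc⟩, hmem, h1, h2, h3, h4⟩
    refine ⟨pr - row, ?_, pc - column, ?_, ?_⟩
    · simp only [List.mem_cons]; omega
    · simp only [List.mem_cons]; omega
    · simpa [show row + (pr - row) = pr by ring, show column + (pc - column) = pc by ring]
        using hmem

-- A returns false iff some ship cell hits the neighbourhood
lemma is_open_sea_eq_false (row column : Int) (fleet : List (List Int)) :
    is_open_sea row column fleet = false ↔
      ∃ ship ∈ fleet, ∃ i ∈ PySem.List.pyRange 0 (PySem.List.pyGetD ship 3 0) 1,
        pvHitA row column (pvCellB ship i).1 (pvCellB ship i).2 = true := by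
  simp [is_open_sea, pvFleetLoopA_eq]

-- ===== VERDICT (by name: the statement is the Claim_ definition above) =====
theorem is_open_sea_spec : Claim_equal_is_open_sea := by
  intro row column fleet _ _
  unfold Spec_is_open_sea
  have hiff : is_open_sea row column fleet = false ↔
      is_open_sea_alt row column fleet = false := by
    rw [is_open_sea_eq_false, is_open_sea_alt_eq_false]
    constructor
    · rintro ⟨ship, hs, i, hi, hhit⟩
      exact ⟨pvCellB ship i, (mem_pvOccupied _ _).mpr ⟨ship, hs, i, hi, rfl⟩,
        (pvHitA_iff _ _ _ _).mp hhit⟩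
    · rintro ⟨p, hp, hn⟩
      obtain ⟨ship, hs, i, hi, rfl⟩ := (mem_pvOccupied _ _).mp hp
      exact ⟨ship, hs, i, hi, (pvHitA_iff _ _ _ _).mpr hn⟩
  cases hA : is_open_sea row column fleet
  · exact (hiff.mp hA).symm
  · cases hB : is_open_sea_alt row column fleet
    · rw [hiff.mpr hB] at hA; exact hA.symm
    · rfl
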